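-- pv_equiv track=rewrite | github.com/ronit450/Habib-University-Semester2-DSA-Programs | Lab10/rk06451_Lab10.py | connection_of_airpot
-- ===== SOURCE A (Python) =====
-- def getInNeighbour(graph,node):
--     lst = []
--     for i in graph:
--         for j in range(len(graph[i])):
--             if graph[i][j][0] == node:
--                 lst.append(i)
--     return lst
--
-- def connection_of_airpot(graph,node):
--     final_lst = []
--     neighbour  = getInNeighbour(graph,node)
--     for i in neighbour:
--         final_lst.append(i)
--         temp = getInNeighbour(graph, i)
--         for j in temp:
--             if j != node:
--                 final_lst.append(j)
--     return final_lst
-- ===== SOURCE B (Python) =====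
-- def connection_of_airpot(graph, node):
--     # Build the reverse-adjacency index in one pass, then answer by lookups.
--     rev = {}
--     for i in graph:
--         for e in graph[i]:
--             rev.setdefault(e[0], []).append(i)
--     out = []
--     for i in rev.get(node, []):
--         out.append(i)
--         out.extend([j for j in rev.get(i, []) if j != node])
--     return out
-- ===== Notes on version B (the rewrite author's own statement) =====
-- stated objective: alternative
-- what changed: B builds a reverse-adjacency index once in a single pass over all edges and answers the in-neighbour queries by dictionary lookups, instead of A's repeated whole-graph scans for the node and for each of its in-neighbours.
import Mathlib
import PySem

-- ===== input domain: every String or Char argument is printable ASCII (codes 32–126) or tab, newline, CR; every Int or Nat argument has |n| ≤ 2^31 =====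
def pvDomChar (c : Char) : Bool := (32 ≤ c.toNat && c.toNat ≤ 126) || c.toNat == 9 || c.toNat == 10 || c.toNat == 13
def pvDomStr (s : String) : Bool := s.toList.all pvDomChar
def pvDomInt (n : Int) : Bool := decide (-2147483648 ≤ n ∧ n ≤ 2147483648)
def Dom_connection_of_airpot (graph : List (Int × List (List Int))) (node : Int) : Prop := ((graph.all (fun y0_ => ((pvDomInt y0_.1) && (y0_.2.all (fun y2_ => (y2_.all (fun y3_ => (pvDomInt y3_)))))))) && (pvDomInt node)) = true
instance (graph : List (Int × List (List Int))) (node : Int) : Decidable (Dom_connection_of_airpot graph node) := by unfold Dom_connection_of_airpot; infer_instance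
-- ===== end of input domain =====

-- B replaces A's repeated whole-graph scans by one reverse-adjacency index built in a single
-- pass over the edges (objective: alternative).

-- ===== PORT A =====
-- getInNeighbour: for i in graph: for j in range(len(graph[i])): if graph[i][j][0] == node: lst.append(i)
def pvGetInNeighbour (graph : List (Int × List (List Int))) (node : Int) : List Int :=
  (graph.map (fun p => p.1)).foldl (fun lst i =>
    let adj := (PySem.Dict.get? (PySem.Dict.mk graph) i).getD []
    (PySem.List.pyRange 0 (adj.length : Int) 1).foldl
      (fun lst j =>
        if PySem.List.pyGetD (PySem.List.pyGetD adj j []) 0 0 == node then lst ++ [i] else lst)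
      lst) []

def connection_of_airpot (graph : List (Int × List (List Int))) (node : Int) : List Int :=
  let neighbour := pvGetInNeighbour graph node
  neighbour.foldl (fun final_lst i =>
    let final_lst := final_lst ++ [i]
    let temp := pvGetInNeighbour graph i
    temp.foldl (fun f j => if j ≠ node then f ++ [j] else f) final_lst) []

-- ===== PORT B =====
-- rev.setdefault(e[0], []).append(i) == rev[e[0]] = rev.get(e[0], []) + [i], i.e. Dict.modify
def pvRev (graph : List (Int × List (List Int))) : PySem.Dict Int (List Int) :=
  graph.foldl (fun rev p =>
    p.2.foldl (fun rev e =>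
      rev.modify (PySem.List.pyGetD e 0 0) [] (fun l => l ++ [p.1])) rev)
    PySem.Dict.empty

def connection_of_airpot_alt (graph : List (Int × List (List Int))) (node : Int) : List Int :=
  let rev := pvRev graph
  (PySem.Dict.getD rev node []).foldl (fun out i =>
    (out ++ [i]) ++ (PySem.Dict.getD rev i []).filter (fun j => decide (j ≠ node))) []

-- ===== PRECONDITION & SPEC =====
-- Pre_ excludes graphs with duplicate keys (not representable as a Python dict, so the assoc-list
-- behaviour is a representation artefact) and graphs containing an empty edge list, on which A
-- raises IndexError at graph[i][j][0].
def Pre_connection_of_airpot (graph : List (Int × List (List Int))) (node : Int) : Prop :=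
  (graph.map Prod.fst).Nodup ∧ ∀ p ∈ graph, ∀ e ∈ p.2, e ≠ []
instance (graph : List (Int × List (List Int))) (node : Int) : Decidable (Pre_connection_of_airpot graph node) := by unfold Pre_connection_of_airpot; infer_instance

def pvWitness_connection_of_airpot : (List (Int × List (List Int))) × Int :=
  ([(0, [[1]]), (1, [[0], [2]]), (2, [[1], [0]])], 0)

def Spec_connection_of_airpot (graph : List (Int × List (List Int))) (node : Int) (out : List Int) : Prop := out = connection_of_airpot_alt graph node
instance (graph : List (Int × List (List Int))) (node : Int) (out : List Int) : Decidable (Spec_connection_of_airpot graph node out) := by unfold Spec_connection_of_airpot; infer_instance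

-- ===== CLAIM (what is proved, stated in full; the proofs are below) =====
def Claim_equal_connection_of_airpot : Prop := ∀ (graph : List (Int × List (List Int))) (node : Int), Dom_connection_of_airpot graph node → Pre_connection_of_airpot graph node → Spec_connection_of_airpot graph node (connection_of_airpot graph node)

-- ===== LEMMAS AND PROOFS =====

-- under Nodup keys, the dict lookup of a listed key returns its paired value
theorem pv_get?_mk_of_mem (graph : List (Int × List (List Int)))
    (h : (graph.map Prod.fst).Nodup) (p : Int × List (List Int)) (hp : p ∈ graph) :
    PySem.Dict.get? (PySem.Dict.mk graph) p.1 = some p.2 := by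
  induction graph with
  | nil => cases hp
  | cons q rest ih =>
    rw [PySem.Dict.get?_mk_cons]
    simp only [List.map_cons, List.nodup_cons] at h
    rcases List.mem_cons.mp hp with rfl | hmem
    · simp
    · have hne : q.1 ≠ p.1 := by
        intro he
        exact h.1 (he ▸ List.mem_map_of_mem hmem)
      simp only [beq_iff_eq, if_neg hne]
      exact ih h.2 hmem

theorem pv_flatMap_congr {α β : Type} (l : List α) (f g : α → List β)
    (h : ∀ x ∈ l, f x = g x) : l.flatMap f = l.flatMap g := by
  induction l with
  | nil => rfl
  | cons x xs ih =>
    simp only [List.flatMap_cons, h x (List.mem_cons_self), ih (fun y hy => h y (List.mem_cons_of_mem _ hy))]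

-- normal form of A's getInNeighbour (needs Nodup keys)
theorem pvGetInNeighbour_eq (graph : List (Int × List (List Int))) (node : Int)
    (h : (graph.map Prod.fst).Nodup) :
    pvGetInNeighbour graph node
      = graph.flatMap (fun p =>
          (p.2.filter (fun e => PySem.List.pyGetD e 0 0 == node)).map (fun _ => p.1)) := by
  unfold pvGetInNeighbour
  have hstep : ∀ (lst : List Int) (i : Int),
      (let adj := (PySem.Dict.get? (PySem.Dict.mk graph) i).getD []
       (PySem.List.pyRange 0 (adj.length : Int) 1).foldl
        (fun lst j =>
          if PySem.List.pyGetD (PySem.List.pyGetD adj j []) 0 0 == node then lst ++ [i] else lst)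
        lst)
      = lst ++ ((((PySem.Dict.get? (PySem.Dict.mk graph) i).getD []).filter
          (fun e => PySem.List.pyGetD e 0 0 == node)).map (fun _ => i)) := by
    intro lst i
    simp only
    rw [PySem.List.foldl_pyRange_zero_pyGetD' _ []
        (fun lst e => if PySem.List.pyGetD e 0 0 == node then lst ++ [i] else lst) lst]
    rw [PySem.List.foldl_append_if (fun e => PySem.List.pyGetD e 0 0 == node) (fun _ => i)]
  simp only [hstep]
  rw [PySem.List.foldl_append_eq_flatMap
      (fun i => (((PySem.Dict.get? (PySem.Dict.mk graph) i).getD []).filter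
        (fun e => PySem.List.pyGetD e 0 0 == node)).map (fun _ => i))]
  rw [List.nil_append, List.flatMap_map]
  exact pv_flatMap_congr _ _ _ (fun p hp => by
    rw [pv_get?_mk_of_mem graph h p hp]; rfl)

-- pvRev as a single fold over the flattened (target, source) pairs
theorem pvRev_eq_flat (graph : List (Int × List (List Int))) :
    pvRev graph
      = (graph.flatMap (fun p => p.2.map (fun e => (PySem.List.pyGetD e 0 0, p.1)))).foldl
          (fun d q => d.modify q.1 [] (fun l => l ++ [q.2])) PySem.Dict.empty := by
  unfold pvRev
  induction graph with
  | nil => rfl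
  | cons p rest ih =>
    simp only [List.foldl_cons, List.flatMap_cons, List.foldl_append, List.foldl_map]
    -- both sides now fold rest / flat rest from the same starting dict
    generalize hd : p.2.foldl (fun rev e =>
      rev.modify (PySem.List.pyGetD e 0 0) [] (fun l => l ++ [p.1])) PySem.Dict.empty = d
    clear ih hd
    induction rest generalizing d with
    | nil => rfl
    | cons q t ih2 =>
      simp only [List.foldl_cons, List.flatMap_cons, List.foldl_append, List.foldl_map]
      exact ih2 _

-- normal form of B's reverse index lookups
theorem pvRev_getD (graph : List (Int × List (List Int))) (x : Int) :
    PySem.Dict.getD (pvRev graph) x []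
      = ((graph.flatMap (fun p => p.2.map (fun e => (PySem.List.pyGetD e 0 0, p.1)))).filter
          (fun q => q.1 == x)).map (fun q => q.2) := by
  rw [pvRev_eq_flat, PySem.Dict.getD_foldl_modify_append]
  rfl

-- the two normal forms coincide: B's lookup computes A's getInNeighbour
theorem pvRev_getD_eq_getIn (graph : List (Int × List (List Int))) (x : Int)
    (h : (graph.map Prod.fst).Nodup) :
    PySem.Dict.getD (pvRev graph) x [] = pvGetInNeighbour graph x := by
  rw [pvRev_getD, pvGetInNeighbour_eq graph x h]
  induction graph with
  | nil => rfl
  | cons p rest ih =>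
    have h' : (rest.map Prod.fst).Nodup := by
      simp only [List.map_cons, List.nodup_cons] at h; exact h.2
    simp only [List.flatMap_cons, List.filter_append, List.map_append, ih h']
    congr 1
    rw [List.filter_map, List.map_map]
    rfl

-- ===== VERDICT (by name: the statement is the Claim_ definition above) =====
theorem connection_of_airpot_spec : Claim_equal_connection_of_airpot := by
  intro graph node _hdom hpre
  unfold Spec_connection_of_airpot connection_of_airpot connection_of_airpot_alt
  have hrev : ∀ x, PySem.Dict.getD (pvRev graph) x [] = pvGetInNeighbour graph x :=
    fun x => pvRev_getD_eq_getIn graph x hpre.1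
  simp only [hrev]
  apply PySem.List.foldl_congr_mem
  intro acc i _
  exact PySem.List.foldl_append_ite_eq_filter (fun j => j ≠ node) _ _
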